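-- pv_equiv track=rewrite | github.com/124476/Ege | task_12/code_task_7.py | f
-- ===== SOURCE A (Python) =====
-- mp = {
--     "k0": "kL1",
--
--     "k1": "kS1",
--     "01": "1L1",
--     "11": "0L1",
-- }
--
-- def f(m):
--     m = list("k" + m + "k")
--
--     q = 0
--     i = len(m) - 1
--
--     while True:
--         c = mp[f"{m[i]}{q}"]
--
--         m[i] = c[0]
--         if c[1] == "S": break
--         if c[1] == "L": i -= 1
--         if c[1] == "R": i += 1
--
--         q = c[2]
--
--     return "".join(m)[1:-1]
-- ===== SOURCE B (Python) =====
-- def f(m):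
--     idx = m.rfind('k')
--     comp = {'0': '1', '1': '0'}
--     return m[:idx+1] + ''.join(comp[c] for c in m[idx+1:])
-- ===== Notes on version B (the rewrite author's own statement) =====
-- stated objective: simpler
-- what changed: A simulates a Turing machine walking right-to-left over a sentinel-padded tape with a transition table; B just locates the last 'k' with m.rfind and returns the unchanged prefix plus the bit-complemented suffix via a {'0':'1','1':'0'} lookup.
import Mathlib
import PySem

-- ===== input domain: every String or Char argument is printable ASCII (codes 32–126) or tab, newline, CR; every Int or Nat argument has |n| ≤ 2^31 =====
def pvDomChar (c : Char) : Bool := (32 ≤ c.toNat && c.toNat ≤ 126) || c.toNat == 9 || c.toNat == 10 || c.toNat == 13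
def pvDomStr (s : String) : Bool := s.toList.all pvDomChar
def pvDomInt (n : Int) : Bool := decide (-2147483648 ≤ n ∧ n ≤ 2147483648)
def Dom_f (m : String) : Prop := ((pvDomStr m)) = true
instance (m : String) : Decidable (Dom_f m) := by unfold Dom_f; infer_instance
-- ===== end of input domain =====

-- B replaces A's Turing-machine simulation by locate-the-last-'k'-then-map (objective: simpler).

-- ===== PORT A =====
-- the module-level transition table mp
def mpA : PySem.Dict String String :=
  PySem.Dict.ofList [("k0", "kL1"), ("k1", "kS1"), ("01", "1L1"), ("11", "0L1")]

-- the `while True` loop of A; state = (tape list m, state q as the char it is formatted to, head i).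
-- The head only ever moves left or stops, because the literal table mp contains no 'R' rule and
-- every reachable 'L' step has i > 0; so the `i += 1` branch and an 'L' step at i = 0 are ported
-- as `none` (as is a KeyError, which Pre_f excludes).
def fGo (lst : List Char) (q : Char) (i : Nat) : Option (List Char) :=
  match PySem.List.pyGet? lst (i : Int) with
  | none => none
  | some ch =>
    match mpA.get? (String.ofList [ch, q]) with     -- c = mp[f"{m[i]}{q}"]
    | none => none                                  -- KeyError
    | some c =>
      match PySem.Str.pyGet? c 0, PySem.Str.pyGet? c 1, PySem.Str.pyGet? c 2 with
      | some c0, some c1, some c2 =>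
        let lst' := lst.set i c0                    -- m[i] = c[0]
        if c1 = 'S' then some lst'                  -- break
        else if c1 = 'L' then
          match i with
          | 0 => none          -- i would become -1; unreachable from f's initial configuration
          | j + 1 => fGo lst' c2 j                  -- i -= 1; q = c[2]
        else none              -- would be the 'R' rule; the literal mp contains none
      | _, _, _ => none

def f (m : String) : String :=
  match fGo ('k' :: m.toList ++ ['k']) '0' (('k' :: m.toList ++ ['k']).length - 1) with
  | some r => String.ofList (PySem.List.slice r (some 1) (some (-1)))   -- "".join(m)[1:-1]
  | none => ""   -- a KeyError in Python; excluded by Pre_f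

-- ===== PORT B =====
def compD : PySem.Dict Char Char := PySem.Dict.ofList [('0', '1'), ('1', '0')]

def f_alt (m : String) : String :=
  match (PySem.List.slice m.toList (some (PySem.Str.rfind m "k" + 1))).mapM
      (fun c => compD.get? c) with                  -- comp[c] for c in m[idx+1:]
  | some t => String.ofList (PySem.List.slice m.toList none (some (PySem.Str.rfind m "k" + 1)) ++ t)
  | none => ""   -- a KeyError in Python; excluded by Pre_f

-- ===== PRECONDITION & SPEC =====
-- Pre_f excludes exactly the inputs on which A (and B) raise KeyError: some character other
-- than '0'/'1' occurring after the last 'k' of m.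
def Pre_f (m : String) : Prop :=
  ((m.toList.reverse.takeWhile (fun c => c != 'k')).all (fun c => c == '0' || c == '1')) = true
instance (m : String) : Decidable (Pre_f m) := by unfold Pre_f; infer_instance

def pvWitness_f : String := "k0"

def Spec_f (m : String) (out : String) : Prop := out = f_alt m
instance (m : String) (out : String) : Decidable (Spec_f m out) := by unfold Spec_f; infer_instance

-- ===== CLAIM (what is proved, stated in full; the proofs are below) =====
def Claim_equal_f : Prop := ∀ (m : String), Dom_f m → Pre_f m → Spec_f m (f m)

-- ===== LEMMAS AND PROOFS =====

-- the complement map, as a function (proof-side only)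
def flipC (c : Char) : Char := if c = '0' then '1' else '0'

theorem flipC_zero : flipC '0' = '1' := rfl
theorem flipC_one : flipC '1' = '0' := rfl

theorem set_append_cons (a : List Char) (x y : Char) (t : List Char) :
    (a ++ x :: t).set a.length y = a ++ y :: t := by
  induction a with
  | nil => rfl
  | cons h tl ih => simp [ih]

theorem take_len (u v : List Char) : (u ++ v).take u.length = u := by simp

theorem drop_len (u v : List Char) : (u ++ v).drop u.length = v := by simp

theorem head?_eq_get0 (s : List Char) : s.head? = s[0]? := by
  simpa using (List.head?_drop (l := s) (i := 0))

theorem prefix_k (l : List Char) : ['k'] <+: l ↔ l.head? = some 'k' := by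
  constructor
  · rintro ⟨t, rfl⟩; rfl
  · intro h
    cases l with
    | nil => simp at h
    | cons x xs =>
      rw [List.head?_cons, Option.some.injEq] at h
      subst h
      exact ⟨xs, rfl⟩

theorem go_eq_neg (s : List Char) :
    ∀ j, (∀ i, i ≤ j → s[i]? ≠ some 'k') →
      PySem.Chars.rfind.go s ['k'] j = -1 := by
  intro j
  induction j with
  | zero =>
    intro h
    have h0 := h 0 (Nat.le_refl 0)
    show (if ['k'].isPrefixOf s = true then (0 : Int) else -1) = -1
    rw [if_neg (by simpa [prefix_k, head?_eq_get0] using h0)]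
  | succ j ih =>
    intro h
    have hj := h (j + 1) (Nat.le_refl _)
    show (if ['k'].isPrefixOf (s.drop (j + 1)) = true then ((j + 1 : Nat) : Int)
        else PySem.Chars.rfind.go s ['k'] j) = -1
    rw [if_neg (by simpa [prefix_k, List.head?_drop] using hj)]
    exact ih (fun i hi => h i (Nat.le_succ_of_le hi))

theorem go_eq (s : List Char) (n : Nat) (hn : s[n]? = some 'k') :
    ∀ j, n ≤ j → (∀ i, n < i → i ≤ j → s[i]? ≠ some 'k') →
      PySem.Chars.rfind.go s ['k'] j = n := by
  intro j
  induction j with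
  | zero =>
    intro hle _
    have hn0 : n = 0 := Nat.le_zero.mp hle
    subst hn0
    show (if ['k'].isPrefixOf s = true then (0 : Int) else -1) = ((0 : Nat) : Int)
    rw [if_pos (by simpa [prefix_k, head?_eq_get0] using hn)]
    simp
  | succ j ih =>
    intro hle h
    by_cases hn1 : n = j + 1
    · subst hn1
      show (if ['k'].isPrefixOf (s.drop (j + 1)) = true then ((j + 1 : Nat) : Int)
          else PySem.Chars.rfind.go s ['k'] j) = ((j + 1 : Nat) : Int)
      rw [if_pos (by simpa [prefix_k, List.head?_drop] using hn)]
    · have hle' : n ≤ j := by omega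
      have hj : s[j + 1]? ≠ some 'k' := h (j + 1) (by omega) (Nat.le_refl _)
      show (if ['k'].isPrefixOf (s.drop (j + 1)) = true then ((j + 1 : Nat) : Int)
          else PySem.Chars.rfind.go s ['k'] j) = ((n : Nat) : Int)
      rw [if_neg (by simpa [prefix_k, List.head?_drop] using hj)]
      exact ih hle' (fun i hi hij => h i hi (Nat.le_succ_of_le hij))

theorem rfind_append (u v : List Char) (hv : 'k' ∉ v) :
    PySem.Chars.rfind (u ++ 'k' :: v) ['k'] = u.length := by
  unfold PySem.Chars.rfind
  have hn : (u ++ 'k' :: v)[u.length]? = some 'k' := by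
    rw [List.getElem?_append_right (Nat.le_refl _)]
    simp
  refine go_eq _ u.length hn _ (by rw [List.length_append]; omega) ?_
  intro i h1 h2 hc
  rw [List.getElem?_append_right (Nat.le_of_lt h1)] at hc
  rw [show i - u.length = (i - u.length - 1) + 1 from by omega,
      List.getElem?_cons_succ] at hc
  exact hv (List.mem_of_getElem? hc)

theorem rfind_none (v : List Char) (hv : 'k' ∉ v) :
    PySem.Chars.rfind v ['k'] = -1 := by
  unfold PySem.Chars.rfind
  apply go_eq_neg
  intro i _ hc
  exact hv (List.mem_of_getElem? hc)

theorem mapM_comp (b : List Char) (hb : ∀ c ∈ b, c = '0' ∨ c = '1') :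
    b.mapM (fun c => compD.get? c) = some (b.map flipC) := by
  induction b with
  | nil => rfl
  | cons x xs ih =>
    have h0 : compD.get? x = some (flipC x) := by
      rcases hb x (by simp) with h | h <;> subst h <;> decide
    rw [List.mapM_cons, h0, ih (fun c hc => hb c (by simp [hc]))]
    rfl

theorem slice_one_neg_one (mid : List Char) :
    PySem.List.slice ('k' :: mid ++ ['k']) (some 1) (some (-1)) = mid := by
  have h1 : PySem.List.clampIdx ('k' :: mid ++ ['k']).length 1 = 1 := by
    simp [PySem.List.clampIdx]
  have h2 : PySem.List.clampIdx ('k' :: mid ++ ['k']).length (-1) =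
      ('k' :: mid ++ ['k']).length - 1 := PySem.List.clampIdx_neg_one _
  simp only [PySem.List.slice, h1, h2]
  simp

theorem fGo_run (b : List Char) :
    ∀ (a t : List Char), (∀ c ∈ b, c = '0' ∨ c = '1') →
      fGo (a ++ 'k' :: b ++ t) '1' (a.length + b.length) =
        some (a ++ 'k' :: b.map flipC ++ t) := by
  induction b using List.reverseRecOn with
  | nil =>
    intro a t _
    have hg : PySem.List.pyGet? (a ++ 'k' :: t) ((a.length : Int)) = some 'k' :=
      PySem.List.pyGet?_append_length a t 'k'
    simp only [List.append_assoc, List.cons_append, List.nil_append, List.length_nil,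
      Nat.add_zero, List.map_nil]
    rw [fGo]
    simp only [hg, show mpA.get? (String.ofList ['k', '1']) = some "kS1" from rfl,
      show PySem.Str.pyGet? "kS1" 0 = some 'k' from rfl,
      show PySem.Str.pyGet? "kS1" 1 = some 'S' from rfl,
      show PySem.Str.pyGet? "kS1" 2 = some '1' from rfl, reduceIte]
    rw [set_append_cons]
  | append_singleton l x ih =>
    intro a t hb
    rcases hb x (by simp) with hx | hx <;> subst hx
    · -- x = '0'
      have hg0 : PySem.List.pyGet? (a ++ 'k' :: (l ++ '0' :: t))
          ((a.length + (l.length + 1) : Nat) : Int) = some '0' := by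
        have h := PySem.List.pyGet?_append_length (a ++ 'k' :: l) t '0'
        simp only [List.append_assoc, List.cons_append, List.nil_append,
          List.length_append, List.length_cons, List.length_nil] at h
        exact h
      have hset0 : (a ++ 'k' :: (l ++ '0' :: t)).set (a.length + (l.length + 1)) '1' =
          a ++ 'k' :: (l ++ '1' :: t) := by
        have h := set_append_cons (a ++ 'k' :: l) '0' '1' t
        simp only [List.append_assoc, List.cons_append, List.nil_append,
          List.length_append, List.length_cons, List.length_nil] at h
        exact h
      have hih0 : fGo (a ++ 'k' :: (l ++ '1' :: t)) '1' (a.length + l.length) =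
          some (a ++ 'k' :: (List.map flipC l ++ '1' :: t)) := by
        have h := ih a ('1' :: t) (fun c hc => hb c (by simp [hc]))
        simpa only [List.append_assoc, List.cons_append, List.nil_append, flipC_zero] using h
      simp only [List.append_assoc, List.cons_append, List.nil_append, List.length_append,
        List.length_cons, List.length_nil, List.map_append, List.map_cons, List.map_nil,
        flipC_zero]
      rw [fGo]
      simp only [hg0, show mpA.get? (String.ofList ['0', '1']) = some "1L1" from rfl,
        show PySem.Str.pyGet? "1L1" 0 = some '1' from rfl,
        show PySem.Str.pyGet? "1L1" 1 = some 'L' from rfl,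
        show PySem.Str.pyGet? "1L1" 2 = some '1' from rfl, reduceIte, hset0]
      exact hih0
    · -- x = '1'
      have hg1 : PySem.List.pyGet? (a ++ 'k' :: (l ++ '1' :: t))
          ((a.length + (l.length + 1) : Nat) : Int) = some '1' := by
        have h := PySem.List.pyGet?_append_length (a ++ 'k' :: l) t '1'
        simp only [List.append_assoc, List.cons_append, List.nil_append,
          List.length_append, List.length_cons, List.length_nil] at h
        exact h
      have hset1 : (a ++ 'k' :: (l ++ '1' :: t)).set (a.length + (l.length + 1)) '0' =
          a ++ 'k' :: (l ++ '0' :: t) := by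
        have h := set_append_cons (a ++ 'k' :: l) '1' '0' t
        simp only [List.append_assoc, List.cons_append, List.nil_append,
          List.length_append, List.length_cons, List.length_nil] at h
        exact h
      have hih1 : fGo (a ++ 'k' :: (l ++ '0' :: t)) '1' (a.length + l.length) =
          some (a ++ 'k' :: (List.map flipC l ++ '0' :: t)) := by
        have h := ih a ('0' :: t) (fun c hc => hb c (by simp [hc]))
        simpa only [List.append_assoc, List.cons_append, List.nil_append, flipC_one] using h
      simp only [List.append_assoc, List.cons_append, List.nil_append, List.length_append,
        List.length_cons, List.length_nil, List.map_append, List.map_cons, List.map_nil,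
        flipC_one]
      rw [fGo]
      simp only [hg1, show mpA.get? (String.ofList ['1', '1']) = some "0L1" from rfl,
        show PySem.Str.pyGet? "0L1" 0 = some '0' from rfl,
        show PySem.Str.pyGet? "0L1" 1 = some 'L' from rfl,
        show PySem.Str.pyGet? "0L1" 2 = some '1' from rfl, reduceIte, hset1]
      exact hih1

theorem fGo_start (a b : List Char) (hb : ∀ c ∈ b, c = '0' ∨ c = '1') :
    fGo (a ++ 'k' :: b ++ ['k']) '0' (a.length + b.length + 1) =
      some (a ++ 'k' :: b.map flipC ++ ['k']) := by
  have hg : PySem.List.pyGet? (a ++ 'k' :: (b ++ ['k']))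
      ((a.length + (b.length + 1) : Nat) : Int) = some 'k' := by
    have h := PySem.List.pyGet?_append_length (a ++ 'k' :: b) [] 'k'
    simp only [List.append_assoc, List.cons_append, List.nil_append,
      List.length_append, List.length_cons, List.length_nil] at h
    exact h
  have hset : (a ++ 'k' :: (b ++ ['k'])).set (a.length + (b.length + 1)) 'k' =
      a ++ 'k' :: (b ++ ['k']) := by
    have h := set_append_cons (a ++ 'k' :: b) 'k' 'k' []
    simp only [List.append_assoc, List.cons_append, List.nil_append,
      List.length_append, List.length_cons, List.length_nil] at h
    exact h
  have hrun : fGo (a ++ 'k' :: (b ++ ['k'])) '1' (a.length + b.length) =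
      some (a ++ 'k' :: (List.map flipC b ++ ['k'])) := by
    have h := fGo_run b a ['k'] hb
    simpa only [List.append_assoc, List.cons_append, List.nil_append] using h
  simp only [List.append_assoc, List.cons_append, List.nil_append, Nat.add_assoc,
    List.map_append, List.map_cons, List.map_nil]
  rw [fGo]
  simp only [hg, show mpA.get? (String.ofList ['k', '0']) = some "kL1" from rfl,
    show PySem.Str.pyGet? "kL1" 0 = some 'k' from rfl,
    show PySem.Str.pyGet? "kL1" 1 = some 'L' from rfl,
    show PySem.Str.pyGet? "kL1" 2 = some '1' from rfl, reduceIte, hset]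
  exact hrun

theorem dropWhile_head_false {p : Char → Bool} {l d' : List Char} {c : Char}
    (h : List.dropWhile p l = c :: d') : p c = false := by
  induction l with
  | nil => simp [List.dropWhile] at h
  | cons x xs ih =>
    rw [List.dropWhile_cons] at h
    by_cases hx : p x = true
    · rw [if_pos hx] at h; exact ih h
    · rw [if_neg hx] at h
      injection h with h1 _
      subst h1
      simpa using hx

theorem hAB (m : String) (u b : List Char) (hcs : m.toList = u ++ 'k' :: b)
    (hkv : 'k' ∉ b) (hb : ∀ c ∈ b, c = '0' ∨ c = '1') : f m = f_alt m := by
  have hA : f m = String.ofList (u ++ 'k' :: b.map flipC) := by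
    unfold f
    rw [hcs]
    rw [show ('k' :: (u ++ 'k' :: b) ++ ['k']).length - 1 = ('k' :: u).length + b.length + 1
        from by simp only [List.length_append, List.length_cons, List.length_nil]; omega]
    rw [show ('k' :: (u ++ 'k' :: b) ++ ['k'] : List Char) = ('k' :: u) ++ 'k' :: b ++ ['k']
        from by simp]
    rw [fGo_start ('k' :: u) b hb]
    show String.ofList (PySem.List.slice (('k' :: u) ++ 'k' :: b.map flipC ++ ['k'])
        (some 1) (some (-1))) = _
    rw [show (('k' :: u) ++ 'k' :: b.map flipC ++ ['k'] : List Char) =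
        'k' :: (u ++ 'k' :: b.map flipC) ++ ['k'] from by simp, slice_one_neg_one]
  have hidx : PySem.Str.rfind m "k" = (u.length : Int) := by
    rw [PySem.Str.rfind_eq, show ("k" : String).toList = ['k'] from rfl, hcs]
    exact rfind_append u b hkv
  have hB : f_alt m = String.ofList ((u ++ ['k']) ++ b.map flipC) := by
    unfold f_alt
    rw [hidx, show (u.length : Int) + 1 = ((u.length + 1 : Nat) : Int) from by push_cast; ring,
      PySem.List.slice_from_natCast, PySem.List.slice_to_natCast, hcs]
    rw [show (u ++ 'k' :: b : List Char).drop (u.length + 1) = b from by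
        rw [show u.length + 1 = (u ++ ['k']).length from by simp,
          show (u ++ 'k' :: b : List Char) = (u ++ ['k']) ++ b from by simp]
        exact drop_len _ _]
    rw [show (u ++ 'k' :: b : List Char).take (u.length + 1) = u ++ ['k'] from by
        rw [show u.length + 1 = (u ++ ['k']).length from by simp,
          show (u ++ 'k' :: b : List Char) = (u ++ ['k']) ++ b from by simp]
        exact take_len _ _]
    rw [mapM_comp b hb]
  rw [hA, hB]
  exact congrArg String.ofList (by simp)

theorem hAB0 (m : String) (hk : 'k' ∉ m.toList)
    (hb : ∀ c ∈ m.toList, c = '0' ∨ c = '1') : f m = f_alt m := by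
  have hA : f m = String.ofList (m.toList.map flipC) := by
    unfold f
    rw [show ('k' :: m.toList ++ ['k']).length - 1 = ([] : List Char).length + m.toList.length + 1
        from by simp]
    rw [show ('k' :: m.toList ++ ['k'] : List Char) = ([] : List Char) ++ 'k' :: m.toList ++ ['k']
        from by simp]
    rw [fGo_start [] m.toList hb]
    show String.ofList (PySem.List.slice (([] : List Char) ++ 'k' :: m.toList.map flipC ++ ['k'])
        (some 1) (some (-1))) = _
    rw [show (([] : List Char) ++ 'k' :: m.toList.map flipC ++ ['k'] : List Char) =
        'k' :: (m.toList.map flipC) ++ ['k'] from by simp, slice_one_neg_one]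
  have hB : f_alt m = String.ofList (m.toList.map flipC) := by
    unfold f_alt
    rw [show PySem.Str.rfind m "k" = -1 from by
        rw [PySem.Str.rfind_eq, show ("k" : String).toList = ['k'] from rfl]
        exact rfind_none _ hk]
    rw [show (-1 : Int) + 1 = ((0 : Nat) : Int) from by decide]
    rw [PySem.List.slice_from_natCast, PySem.List.slice_to_natCast,
      List.drop_zero, List.take_zero, mapM_comp _ hb]
    rfl
  rw [hA, hB]

-- ===== VERDICT (by name: the statement is the Claim_ definition above) =====
theorem f_spec : Claim_equal_f := by
  intro m _hd hpre
  show f m = f_alt m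
  unfold Pre_f at hpre
  have hpre' : ∀ c ∈ m.toList.reverse.takeWhile (fun c => c != 'k'), c = '0' ∨ c = '1' := by
    intro c hc
    have := List.all_eq_true.mp hpre c hc
    simpa using this
  by_cases hk : 'k' ∈ m.toList
  · obtain ⟨c, d', hdd⟩ : ∃ c d',
        List.dropWhile (fun c => c != 'k') m.toList.reverse = c :: d' := by
      cases hE : List.dropWhile (fun c => c != 'k') m.toList.reverse with
      | nil =>
        exfalso
        have := List.dropWhile_eq_nil_iff.mp hE 'k' (List.mem_reverse.mpr hk)
        simp at this
      | cons c d' => exact ⟨c, d', rfl⟩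
    have hc : c = 'k' := by simpa using dropWhile_head_false hdd
    subst hc
    have hsplit : List.takeWhile (fun c => c != 'k') m.toList.reverse ++ 'k' :: d' =
        m.toList.reverse := by
      rw [← hdd]; exact List.takeWhile_append_dropWhile
    have hcs : m.toList = d'.reverse ++ 'k' ::
        (List.takeWhile (fun c => c != 'k') m.toList.reverse).reverse := by
      have h2 := congrArg List.reverse hsplit
      simpa using h2.symm
    have hkv : 'k' ∉ (List.takeWhile (fun c => c != 'k') m.toList.reverse).reverse := by
      intro hm
      have := List.mem_takeWhile_imp (List.mem_reverse.mp hm)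
      simp at this
    have hb : ∀ c ∈ (List.takeWhile (fun c => c != 'k') m.toList.reverse).reverse,
        c = '0' ∨ c = '1' := fun c hc => hpre' c (List.mem_reverse.mp hc)
    exact hAB m d'.reverse _ hcs hkv hb
  · have hb : ∀ c ∈ m.toList, c = '0' ∨ c = '1' := by
      intro c hc
      apply hpre'
      rw [List.takeWhile_eq_self_iff.mpr ?_]
      · exact List.mem_reverse.mpr hc
      · intro x hx
        have hxm : x ∈ m.toList := List.mem_reverse.mp hx
        simp only [bne_iff_ne, ne_eq]
        intro h
        exact hk (h ▸ hxm)
    exact hAB0 m hk hb
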